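-- pv_equiv track=rewrite | github.com/PennyLaneAI/pennylane | pennylane/labs/vibronic/old/vibronic.py | _sub_dicts
-- ===== SOURCE A (Python) =====
-- def _sub_dicts(d1: dict, d2: dict):
--     new_dict = {}
--     for key in d1.keys():
--         if key in d2.keys():
--             new_dict[key] = d1[key] - d2[key]
--         else:
--             new_dict[key] = d1[key]
--
--     for key in d2.keys():
--         if key not in d1.keys():
--             new_dict[key] = d2[key]
--
--     return new_dict
-- ===== SOURCE B (Python) =====
-- def _sub_dicts(d1: dict, d2: dict):
--     new_dict = dict(d1)
--     for key, value in d2.items():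
--         if key in new_dict:
--             new_dict[key] = new_dict[key] - value
--         else:
--             new_dict[key] = value
--     return new_dict
-- ===== Notes on version B (the rewrite author's own statement) =====
-- stated objective: simpler
-- what changed: Replaces A's two passes (one over d1 with lookups into d2, one over d2 checking membership in d1) by a shallow copy of d1 followed by a single fold over d2's items that subtracts on shared keys and appends new ones.
import Mathlib
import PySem

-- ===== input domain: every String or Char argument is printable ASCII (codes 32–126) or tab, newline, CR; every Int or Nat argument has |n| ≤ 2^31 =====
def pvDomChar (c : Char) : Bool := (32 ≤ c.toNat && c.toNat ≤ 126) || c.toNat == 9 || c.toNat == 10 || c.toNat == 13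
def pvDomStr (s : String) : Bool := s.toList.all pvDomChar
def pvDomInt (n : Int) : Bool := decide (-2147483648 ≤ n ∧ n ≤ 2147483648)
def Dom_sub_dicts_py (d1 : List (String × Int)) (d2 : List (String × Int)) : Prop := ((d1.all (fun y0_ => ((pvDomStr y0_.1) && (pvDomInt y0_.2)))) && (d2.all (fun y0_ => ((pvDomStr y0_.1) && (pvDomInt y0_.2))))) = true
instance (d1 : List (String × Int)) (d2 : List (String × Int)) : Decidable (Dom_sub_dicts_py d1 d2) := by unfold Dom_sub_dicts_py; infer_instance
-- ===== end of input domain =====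

-- B replaces A's two passes (loop over d1 with lookups into d2, then loop over d2 checking
-- membership in d1) by a shallow copy of d1 followed by one fold over d2's items; same result, same cost.


-- ===== PORT A =====
-- literal port of _sub_dicts: first loop over d1's keys (subtracting d2's value on shared keys),
-- second loop over d2's keys adding the keys missing from d1
def sub_dicts_py (d1 : List (String × Int)) (d2 : List (String × Int)) : List (String × Int) :=
  let D1 := PySem.Dict.ofList d1
  let D2 := PySem.Dict.ofList d2
  let new1 := D1.keys.foldl (fun nd key =>
      if D2.contains key then nd.insert key (D1.getD key 0 - D2.getD key 0)
      else nd.insert key (D1.getD key 0)) PySem.Dict.empty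
  let new2 := D2.keys.foldl (fun nd key =>
      if !(D1.contains key) then nd.insert key (D2.getD key 0) else nd) new1
  new2.items

-- ===== PORT B =====
-- port of Source B: new_dict = dict(d1), then one loop over d2.items()
def sub_dicts_py_alt (d1 : List (String × Int)) (d2 : List (String × Int)) : List (String × Int) :=
  let D1 := PySem.Dict.ofList d1
  let D2 := PySem.Dict.ofList d2
  (D2.items.foldl (fun nd kv =>
      if nd.contains kv.1 then nd.insert kv.1 (nd.getD kv.1 0 - kv.2)
      else nd.insert kv.1 kv.2) D1).items

-- ===== PRECONDITION & SPEC =====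
def Spec_sub_dicts_py (d1 : List (String × Int)) (d2 : List (String × Int)) (out : List (String × Int)) : Prop := out = sub_dicts_py_alt d1 d2
instance (d1 : List (String × Int)) (d2 : List (String × Int)) (out : List (String × Int)) : Decidable (Spec_sub_dicts_py d1 d2 out) := by unfold Spec_sub_dicts_py; infer_instance

-- ===== CLAIM (what is proved, stated in full; the proofs are below) =====
def Claim_equal_sub_dicts_py : Prop := ∀ (d1 : List (String × Int)) (d2 : List (String × Int)), Dom_sub_dicts_py d1 d2 → Spec_sub_dicts_py d1 d2 (sub_dicts_py d1 d2)

-- ===== LEMMAS AND PROOFS =====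
theorem getD_mk_not_mem (l : List (String × Int)) (k : String)
    (h : k ∉ l.map Prod.fst) : (PySem.Dict.mk l).getD k 0 = 0 := by
  apply PySem.Dict.getD_of_not_contains
  rw [PySem.Dict.contains_eq_decide_mem_keys]
  simp [PySem.Dict.keys, h]

theorem getD_mk_cons (k : String) (v : Int) (t : List (String × Int)) (x : String) :
    (PySem.Dict.mk ((k, v) :: t)).getD x 0
      = if k = x then v else (PySem.Dict.mk t).getD x 0 := by
  rw [PySem.Dict.getD_eq_get?_getD, PySem.Dict.get?_mk_cons]
  by_cases h : k = x <;> simp [h, PySem.Dict.getD_eq_get?_getD]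

theorem b_fold_items (l : List (String × Int)) (d : PySem.Dict String Int)
    (hd : d.keys.Nodup) (hl : (l.map Prod.fst).Nodup) :
    (l.foldl (fun nd kv =>
        if nd.contains kv.1 then nd.insert kv.1 (nd.getD kv.1 0 - kv.2)
        else nd.insert kv.1 kv.2) d).items
      = d.items.map (fun q => (q.1, q.2 - ((PySem.Dict.mk l).getD q.1 0)))
          ++ l.filter (fun pr => !(d.contains pr.1)) := by
  induction l generalizing d with
  | nil =>
    have h0 : ∀ q : String × Int, (PySem.Dict.mk ([] : List (String × Int))).getD q.1 0 = 0 :=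
      fun q => getD_mk_not_mem [] q.1 (by simp)
    simp [h0]
  | cons hd0 t ih =>
    obtain ⟨k, v⟩ := hd0
    simp only [List.map_cons, List.nodup_cons] at hl
    obtain ⟨hk, ht⟩ := hl
    simp only [List.foldl_cons]
    by_cases hc : d.contains k = true
    · rw [if_pos hc]
      have hd' : (d.insert k (d.getD k 0 - v)).keys.Nodup :=
        PySem.Dict.nodup_keys_insert _ _ _ hd
      rw [ih _ hd' ht]
      rw [PySem.Dict.items_insert_of_contains _ _ hc]
      rw [List.map_map]
      congr 1
      · apply List.map_congr_left
        intro q hq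
        obtain ⟨q1, q2⟩ := q
        by_cases hqk : q1 = k
        · subst hqk
          have hget : d.getD q1 0 = q2 := PySem.Dict.getD_of_mem_items d hq hd 0
          simp [hget, getD_mk_cons, getD_mk_not_mem t q1 hk]
        · have hbeq : (q1 == k) = false := by simpa using hqk
          simp only [Function.comp_apply, hbeq, Bool.false_eq_true, if_false]
          rw [getD_mk_cons, if_neg (fun h => hqk h.symm)]
      · rw [List.filter_cons]
        simp only [hc, Bool.not_true, Bool.false_eq_true, if_false]
        apply List.filter_congr
        intro p hp
        have hpk : p.1 ≠ k := fun h => hk (h ▸ List.mem_map_of_mem hp)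
        rw [PySem.Dict.contains_insert]
        simp [hpk]
    · rw [if_neg hc]
      have hcf : d.contains k = false := by simpa using hc
      have hd' : (d.insert k v).keys.Nodup := PySem.Dict.nodup_keys_insert _ _ _ hd
      rw [ih _ hd' ht]
      rw [PySem.Dict.items_insert_of_not_contains _ _ hcf]
      rw [List.map_append, List.filter_cons]
      simp only [hcf, Bool.not_false, if_pos]
      have h1 : (d.items.map (fun q => (q.1, q.2 - ((PySem.Dict.mk t).getD q.1 0))))
          = d.items.map (fun q => (q.1, q.2 - ((PySem.Dict.mk ((k, v) :: t)).getD q.1 0))) := by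
        apply List.map_congr_left
        intro q hq
        obtain ⟨q1, q2⟩ := q
        have hq1 : q1 ∈ d.keys := by
          have : q1 ∈ d.items.map Prod.fst := List.mem_map_of_mem hq
          simpa [PySem.Dict.keys] using this
        have hqk : q1 ≠ k := by
          intro h
          rw [PySem.Dict.contains_eq_decide_mem_keys] at hcf
          subst h
          simp [hq1] at hcf
        simp only
        rw [getD_mk_cons, if_neg (fun h => hqk h.symm)]
      have h4 : t.filter (fun pr => !((d.insert k v).contains pr.1))
          = t.filter (fun pr => !(d.contains pr.1)) := by
        apply List.filter_congr
        intro p hp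
        have hpk : p.1 ≠ k := fun h => hk (h ▸ List.mem_map_of_mem hp)
        rw [PySem.Dict.contains_insert]
        simp [hpk]
      rw [List.map_cons, h1, h4]
      simp [getD_mk_not_mem t k hk]

theorem foldl_ite_insert (l : List String) (p : String → Bool) (g : String → Int)
    (d : PySem.Dict String Int) :
    l.foldl (fun nd k => if p k then nd.insert k (g k) else nd) d
      = (l.filter p).foldl (fun nd k => nd.insert k (g k)) d := by
  induction l generalizing d with
  | nil => rfl
  | cons k t ih =>
    by_cases h : p k = true <;> simp [List.foldl, List.filter, h, ih]

theorem main_eq (d1 d2 : List (String × Int)) : sub_dicts_py d1 d2 = sub_dicts_py_alt d1 d2 := by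
  unfold sub_dicts_py sub_dicts_py_alt
  simp only []
  set D1 := PySem.Dict.ofList d1 with hD1
  set D2 := PySem.Dict.ofList d2 with hD2
  have hn1 : D1.keys.Nodup := PySem.Dict.nodup_keys_ofList d1
  have hn2 : D2.keys.Nodup := PySem.Dict.nodup_keys_ofList d2
  -- B side
  have hB : (D2.items.foldl (fun nd kv =>
        if nd.contains kv.1 then nd.insert kv.1 (nd.getD kv.1 0 - kv.2)
        else nd.insert kv.1 kv.2) D1).items
      = D1.items.map (fun q => (q.1, q.2 - D2.getD q.1 0))
          ++ D2.items.filter (fun pr => !(D1.contains pr.1)) := by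
    have hlnd : (D2.items.map Prod.fst).Nodup := by
      simpa [PySem.Dict.keys] using hn2
    have := b_fold_items D2.items D1 hn1 hlnd
    simpa using this
  rw [hB]
  -- A side, first loop
  have hfun : (fun (nd : PySem.Dict String Int) key =>
        if D2.contains key then nd.insert key (D1.getD key 0 - D2.getD key 0)
        else nd.insert key (D1.getD key 0))
      = fun nd key => nd.insert key
          (if D2.contains key then D1.getD key 0 - D2.getD key 0 else D1.getD key 0) := by
    funext nd key
    by_cases h : D2.contains key = true <;> simp [h]
  rw [hfun]
  set vA := fun key => if D2.contains key then D1.getD key 0 - D2.getD key 0 else D1.getD key 0 with hvA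
  have hA1 : (D1.keys.foldl (fun nd key => nd.insert key (vA key)) PySem.Dict.empty).items
      = PySem.Dict.empty.items ++ D1.keys.map (fun k => (k, vA k)) :=
    PySem.Dict.items_foldl_insert_fresh D1.keys (fun a => a) vA PySem.Dict.empty
      (fun a _ => PySem.Dict.contains_empty a) (by simpa using hn1)
  have hkeys1 : (D1.keys.foldl (fun nd key => nd.insert key (vA key)) PySem.Dict.empty).keys
      = D1.keys := by
    rw [PySem.Dict.keys_foldl_insert, PySem.Dict.keys_empty]
    rw [PySem.Set.update_eq_append_of_disjoint [] D1.keys hn1 (by simp)]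
    simp
  set new1 := D1.keys.foldl (fun nd key => nd.insert key (vA key)) PySem.Dict.empty with hnew1
  -- second loop
  rw [foldl_ite_insert D2.keys (fun key => !(D1.contains key)) (fun key => D2.getD key 0) new1]
  have hA2 : ((D2.keys.filter (fun key => !(D1.contains key))).foldl
        (fun nd k => nd.insert k (D2.getD k 0)) new1).items
      = new1.items ++ (D2.keys.filter (fun key => !(D1.contains key))).map
          (fun k => (k, D2.getD k 0)) := by
    apply PySem.Dict.items_foldl_insert_fresh
    · intro a ha
      have hpa : D1.contains a = false := by
        have := List.of_mem_filter ha
        simpa using this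
      have hnot : a ∉ D1.keys := by
        intro hmem
        rw [PySem.Dict.contains_eq_decide_mem_keys] at hpa
        simp [hmem] at hpa
      rw [PySem.Dict.contains_eq_decide_mem_keys, hkeys1]
      simp [hnot]
    · simpa using (List.Nodup.filter _ hn2)
  rw [hA2, hA1]
  -- compare the two halves
  have hpart1 : D1.items.map (fun q => (q.1, q.2 - D2.getD q.1 0))
      = D1.keys.map (fun k => (k, vA k)) := by
    rw [PySem.Dict.items_eq_map_keys D1 hn1 0, List.map_map]
    apply List.map_congr_left
    intro k _
    simp only [Function.comp_apply, hvA]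
    by_cases h : D2.contains k = true
    · simp [h]
    · have hf : D2.contains k = false := by simpa using h
      have h0 : D2.getD k 0 = 0 := by
        apply PySem.Dict.getD_of_not_contains
        exact hf
      simp [hf, h0]
  have hpart2 : D2.items.filter (fun pr => !(D1.contains pr.1))
      = (D2.keys.filter (fun key => !(D1.contains key))).map (fun k => (k, D2.getD k 0)) := by
    rw [PySem.Dict.items_eq_map_keys D2 hn2 0, List.filter_map]
    rfl
  rw [hpart1, hpart2]
  simp [show PySem.Dict.empty.items = ([] : List (String × Int)) from rfl]


-- ===== VERDICT (by name: the statement is the Claim_ definition above) =====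
theorem sub_dicts_py_spec : Claim_equal_sub_dicts_py := by
  intro d1 d2 _
  unfold Spec_sub_dicts_py
  exact main_eq d1 d2
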